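-- pv_equiv track=rewrite | github.com/sunoftwilight/Algorithm | SWEA/Review_1216palindrome2.py | col_max
-- ===== SOURCE A (Python) =====
-- def col_max(arr, N):
--     M = N
--
--     while M > 0:
--         for i in range(N):
--             for j in range(N - M + 1):  # i, j는 회문 비교의 시작점
--                 flag = 1
--                 for k in range(M // 2):
--                     # j는 M-1부터 (회문의 길이 // 2)만큼 안쪽까지 탐색  (왼<-오)
--                     if arr[j + k][i] != arr[j + (M - 1) - k][i]:
--                         flag = 0
--                         break
--
--                 if flag:
--                     return M    # 큰 거부터 탐색했으니까 회문 나오면 그게 제일 긴 길이이므로 바로 return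
--         M -= 1  # 회문 아니면 회문 길이인 M 줄여서 다시 탐색
-- ===== SOURCE B (Python) =====
-- def col_max(arr, N):
--     # expand-around-center: grow the longest palindrome from every odd/even
--     # center of every column; keep the global maximum length, stopping early
--     # once it reaches the upper bound N.
--     if N <= 0:
--         return None
--     best = 1
--     for i in range(N):
--         for c in range(N):
--             lo, hi = c, c
--             while lo - 1 >= 0 and hi + 1 < N and arr[lo - 1][i] == arr[hi + 1][i]:
--                 lo -= 1
--                 hi += 1
--             if hi - lo + 1 > best:
--                 best = hi - lo + 1
--             if c + 1 < N and arr[c][i] == arr[c + 1][i]: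
--                 lo, hi = c, c + 1
--                 while lo - 1 >= 0 and hi + 1 < N and arr[lo - 1][i] == arr[hi + 1][i]:
--                     lo -= 1
--                     hi += 1
--                 if hi - lo + 1 > best:
--                     best = hi - lo + 1
--         if best == N:
--             break
--     return best
-- ===== Notes on version B (the rewrite author's own statement) =====
-- stated objective: alternative
-- what changed: Replaces A's descending-length brute-force scan (for each length M try every column and start, re-comparing all char pairs) by expand-around-center: the longest palindrome is grown from every odd/even center of every column, keeping the maximum and stopping once it reaches the bound N; better worst case (O(N^3) vs O(N^4)) but slower on all-equal inputs where A's first probe exits immediately.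
-- outside the precondition, e.g. on col_max(['aa', 'b', 'ca'], 3): A returns 3, B raises IndexError
import Mathlib
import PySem

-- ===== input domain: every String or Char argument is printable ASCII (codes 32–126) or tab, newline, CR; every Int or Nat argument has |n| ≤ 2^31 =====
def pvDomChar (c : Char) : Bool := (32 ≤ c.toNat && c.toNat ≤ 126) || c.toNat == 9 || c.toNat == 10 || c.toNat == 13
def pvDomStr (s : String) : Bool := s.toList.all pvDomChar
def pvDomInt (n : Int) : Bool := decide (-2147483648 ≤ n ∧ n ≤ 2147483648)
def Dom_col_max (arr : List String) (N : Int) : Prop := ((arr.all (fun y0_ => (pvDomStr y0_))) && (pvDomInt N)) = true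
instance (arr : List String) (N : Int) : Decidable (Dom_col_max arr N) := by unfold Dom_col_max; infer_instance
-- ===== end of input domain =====

-- B replaces A's descending brute-force palindrome search by expand-around-center per column (alternative algorithm; different worst-case profile, not claimed faster).

-- arr[r][i]; the .getD defaults are never reached inside Pre_col_max (all cells read there exist)
def charAt (arr : List String) (r i : Int) : Char :=
  (PySem.Str.pyGet? ((PySem.List.pyGet? arr r).getD "") i).getD ' '

-- ===== PORT A =====
-- inner k-loop with flag/break: flag survives iff every compared pair is equal
def aCheck (arr : List String) (i j M : Int) : Bool :=
  (PySem.List.pyRange 0 (PySem.Int.floordiv M 2) 1).all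
    (fun k => charAt arr (j + k) i == charAt arr (j + (M - 1) - k) i)

-- the two nested for-loops with early 'return M'
def aFind (arr : List String) (N M : Int) : Bool :=
  (PySem.List.pyRange 0 N 1).any fun i =>
    (PySem.List.pyRange 0 (N - M + 1) 1).any fun j => aCheck arr i j M

-- the 'while M > 0' loop; fuel N.toNat is exactly the number of iterations Python performs
def aLoop (arr : List String) (N : Int) : Int → Nat → Option Int
  | _, 0 => none
  | M, fuel+1 =>
    if 0 < M then (if aFind arr N M then some M else aLoop arr N (M - 1) fuel) else none

def col_max (arr : List String) (N : Int) : Option Int := aLoop arr N N N.toNat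

-- ===== PORT B =====
-- the while-loop growing a palindrome around a center; fuel N.toNat bounds the ≤ lo iterations
def expand (arr : List String) (N i : Int) : Int → Int → Nat → Int × Int
  | lo, hi, 0 => (lo, hi)
  | lo, hi, fuel+1 =>
    if 0 ≤ lo - 1 ∧ hi + 1 < N ∧ charAt arr (lo - 1) i = charAt arr (hi + 1) i
    then expand arr N i (lo - 1) (hi + 1) fuel
    else (lo, hi)

-- body of 'for c in range(N)'
def bColStep (arr : List String) (N i : Int) (best c : Int) : Int :=
  let p := expand arr N i c c N.toNat
  let best := if p.2 - p.1 + 1 > best then p.2 - p.1 + 1 else best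
  if c + 1 < N ∧ charAt arr c i = charAt arr (c + 1) i then
    let q := expand arr N i c (c + 1) N.toNat
    if q.2 - q.1 + 1 > best then q.2 - q.1 + 1 else best
  else best

def bCol (arr : List String) (N i best : Int) : Int :=
  (PySem.List.pyRange 0 N 1).foldl (bColStep arr N i) best

-- outer 'for i in range(N)' with the 'if best == N: break' encoded as a skipping fold
def col_max_alt (arr : List String) (N : Int) : Option Int :=
  if N ≤ 0 then none
  else some ((PySem.List.pyRange 0 N 1).foldl
    (fun best i => if best = N then best else bCol arr N i best) 1)

-- ===== PRECONDITION & SPEC =====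
-- Pre_ restricts to a proper N×N matrix (at least N rows, the first N rows of length ≥ N):
-- on ragged/short inputs both programs may raise IndexError (which missing cell is read first
-- is accidental), and on a few of them A still returns through its early exit while B raises.
def Pre_col_max (arr : List String) (N : Int) : Prop :=
  N ≤ 0 ∨ (N ≤ arr.length ∧ ∀ s ∈ arr.take N.toNat, N ≤ (s.toList.length : Int))
instance (arr : List String) (N : Int) : Decidable (Pre_col_max arr N) := by
  unfold Pre_col_max; infer_instance

def pvWitness_col_max : List String × Int := (["ab", "ca"], 2)

def Spec_col_max (arr : List String) (N : Int) (out : Option Int) : Prop := out = col_max_alt arr N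
instance (arr : List String) (N : Int) (out : Option Int) : Decidable (Spec_col_max arr N out) := by
  unfold Spec_col_max; infer_instance

-- ===== CLAIM (what is proved, stated in full; the proofs are below) =====
def Claim_equal_col_max : Prop := ∀ (arr : List String) (N : Int),
  Dom_col_max arr N → Pre_col_max arr N → Spec_col_max arr N (col_max arr N)

-- ===== LEMMAS AND PROOFS =====

-- the palindrome pair-check of A, as a function of an abstract column reader
def PW (f : Int → Char) (j m : Int) : Bool :=
  (PySem.List.pyRange 0 (PySem.Int.floordiv m 2) 1).all
    (fun k => f (j + k) == f (j + (m - 1) - k))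

theorem aCheck_eq_PW (arr : List String) (i j M : Int) :
    aCheck arr i j M = PW (fun r => charAt arr r i) j M := rfl

theorem PW_iff (f : Int → Char) (j m : Int) :
    PW f j m = true ↔ ∀ k : Int, 0 ≤ k → k < PySem.Int.floordiv m 2 → f (j + k) = f (j + (m - 1) - k) := by
  simp [PW, List.all_eq_true, PySem.List.mem_pyRange_one, beq_iff_eq]

theorem fd2 (m : Int) : PySem.Int.floordiv m 2 = m / 2 :=
  PySem.Int.floordiv_eq_ediv_of_pos (by omega)

theorem PW_small (f : Int → Char) (j m : Int) (hm : m ≤ 1) : PW f j m = true := by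
  rw [PW_iff]; intro k h0 h1; rw [fd2] at h1; omega

theorem PW_rec (f : Int → Char) (j m : Int) (hm : 2 ≤ m) :
    PW f j m = ((f j == f (j + m - 1)) && PW f (j + 1) (m - 2)) := by
  rw [Bool.eq_iff_iff, Bool.and_eq_true, beq_iff_eq, PW_iff, PW_iff]
  constructor
  · intro h
    refine ⟨?_, ?_⟩
    · have := h 0 le_rfl (by rw [fd2]; omega)
      rw [show j + (0:Int) = j by omega, show j + (m-1) - 0 = j + m - 1 by omega] at this
      exact this
    · intro k h0 h1
      rw [fd2] at h1
      have := h (k+1) (by omega) (by rw [fd2]; omega)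
      rw [show j + (k+1) = j + 1 + k by omega,
          show j + (m-1) - (k+1) = j + 1 + (m - 2 - 1) - k by omega] at this
      exact this
  · intro ⟨h1l, h2⟩ k h0 hk
    rw [fd2] at hk
    rcases eq_or_lt_of_le h0 with h|h
    · rw [show j + k = j from by omega, show j + (m-1) - k = j + m - 1 from by omega]
      exact h1l
    · have := h2 (k-1) (by omega) (by rw [fd2]; omega)
      rw [show j + 1 + (k-1) = j + k by omega,
          show j + 1 + (m - 2 - 1) - (k-1) = j + (m-1) - k by omega] at this
      exact this

theorem PW_two (f : Int → Char) (c : Int) (h : f c = f (c + 1)) : PW f c 2 = true := by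
  rw [PW_rec f c 2 le_rfl]
  simp only [Bool.and_eq_true, beq_iff_eq]
  exact ⟨by rw [show c + 2 - 1 = c + 1 from by omega]; exact h, PW_small _ _ _ (by omega)⟩

-- soundness: the expansion's final window is a palindrome within [0, N)
theorem expand_sound (arr : List String) (N i : Int) :
    ∀ (fuel : Nat) (lo hi : Int), 0 ≤ lo → hi < N → lo ≤ hi →
      PW (fun r => charAt arr r i) lo (hi - lo + 1) = true →
      0 ≤ (expand arr N i lo hi fuel).1 ∧ (expand arr N i lo hi fuel).2 < N ∧
      (expand arr N i lo hi fuel).1 ≤ (expand arr N i lo hi fuel).2 ∧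
      PW (fun r => charAt arr r i) (expand arr N i lo hi fuel).1
        ((expand arr N i lo hi fuel).2 - (expand arr N i lo hi fuel).1 + 1) = true := by
  intro fuel
  induction fuel with
  | zero => intro lo hi h0 h1 h2 h3; exact ⟨h0, h1, h2, h3⟩
  | succ n ih =>
    intro lo hi h0 h1 h2 h3
    rw [expand]
    split
    · rename_i hc
      obtain ⟨c1, c2, c3⟩ := hc
      apply ih (lo-1) (hi+1) c1 c2 (by omega)
      rw [show hi + 1 - (lo - 1) + 1 = hi - lo + 3 from by omega]
      rw [PW_rec _ _ _ (by omega)]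
      simp only [Bool.and_eq_true, beq_iff_eq]
      constructor
      · rw [show (lo - 1) + (hi - lo + 3) - 1 = hi + 1 from by omega]; exact c3
      · rw [show lo - 1 + 1 = lo from by omega, show hi - lo + 3 - 2 = hi - lo + 1 from by omega]
        exact h3
    · exact ⟨h0, h1, h2, h3⟩

theorem expand_len_mono (arr : List String) (N i : Int) :
    ∀ (fuel : Nat) (lo hi : Int),
      hi - lo + 1 ≤ (expand arr N i lo hi fuel).2 - (expand arr N i lo hi fuel).1 + 1 := by
  intro fuel
  induction fuel with
  | zero => intro lo hi; simp [expand]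
  | succ n ih =>
    intro lo hi
    rw [expand]
    split
    · have := ih (lo-1) (hi+1); omega
    · omega

-- completeness: starting at the center of a palindrome [j, j+m), the expansion reaches length ≥ m
theorem expand_ge (arr : List String) (N i j m : Int)
    (hPW : PW (fun r => charAt arr r i) j m = true) (hj : 0 ≤ j) (hjm : j + m - 1 < N) :
    ∀ (fuel : Nat) (lo hi : Int), j ≤ lo → lo ≤ hi → lo + hi = 2 * j + m - 1 →
      (lo - j).toNat ≤ fuel →
      m ≤ (expand arr N i lo hi fuel).2 - (expand arr N i lo hi fuel).1 + 1 := by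
  intro fuel
  induction fuel with
  | zero =>
    intro lo hi h0 h1 h2 h3
    have : lo = j := by omega
    subst this
    simp [expand]; omega
  | succ n ih =>
    intro lo hi h0 h1 h2 h3
    rcases eq_or_lt_of_le h0 with he|he
    · -- lo = j: the window already covers the whole palindrome, and steps only grow it
      have := expand_len_mono arr N i (n+1) lo hi
      omega
    · -- lo > j: the guard holds, take the step
      rw [expand]
      have hk : charAt arr (lo - 1) i = charAt arr (hi + 1) i := by
        have := (PW_iff _ _ _).mp hPW (lo - 1 - j) (by omega) (by rw [fd2]; omega)
        rw [show j + (lo - 1 - j) = lo - 1 from by omega,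
            show j + (m - 1) - (lo - 1 - j) = hi + 1 from by omega] at this
        exact this
      rw [if_pos ⟨by omega, by omega, hk⟩]
      exact ih (lo-1) (hi+1) (by omega) (by omega) (by omega) (by omega)

-- the descending while-loop returns the greatest length with a palindrome
theorem aLoop_spec (arr : List String) (N : Int) (h1 : aFind arr N 1 = true) :
    ∀ (fuel : Nat) (M : Int), 1 ≤ M → M.toNat ≤ fuel →
      ∃ g, aLoop arr N M fuel = some g ∧ 1 ≤ g ∧ g ≤ M ∧ aFind arr N g = true ∧
        ∀ m, g < m → m ≤ M → aFind arr N m = false := by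
  intro fuel
  induction fuel with
  | zero => intro M hM hf; omega
  | succ n ih =>
    intro M hM hf
    rw [aLoop, if_pos (by omega : (0:Int) < M)]
    by_cases hfind : aFind arr N M = true
    · exact ⟨M, by rw [hfind]; simp, hM, le_rfl, hfind, fun m hm1 hm2 => by omega⟩
    · have hM2 : 2 ≤ M := by
        rcases eq_or_lt_of_le hM with he|he
        · exact absurd (he ▸ h1) hfind
        · omega
      obtain ⟨g, hg1, hg2, hg3, hg4, hg5⟩ := ih (M - 1) (by omega) (by omega)
      refine ⟨g, ?_, hg2, by omega, hg4, ?_⟩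
      · rw [Bool.eq_false_iff.mpr hfind]; simpa using hg1
      · intro m hm1 hm2
        rcases eq_or_lt_of_le hm2 with he|he
        · exact he ▸ Bool.eq_false_iff.mpr hfind
        · exact hg5 m hm1 (by omega)

-- generic fold bounds
theorem foldl_ge_init {α : Type} (step : Int → α → Int) (h : ∀ b c, b ≤ step b c) :
    ∀ (l : List α) (b : Int), b ≤ l.foldl step b := by
  intro l
  induction l with
  | nil => intro b; simp
  | cons x xs ih => intro b; exact le_trans (h b x) (ih (step b x))

theorem foldl_ge_of_mem {α : Type} (step : Int → α → Int) (h : ∀ b c, b ≤ step b c)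
    (l : List α) (c : α) (hc : c ∈ l) (v : Int) (hv : ∀ b, v ≤ step b c) (b : Int) :
    v ≤ l.foldl step b := by
  obtain ⟨l1, l2, rfl⟩ := List.append_of_mem hc
  rw [List.foldl_append, List.foldl_cons]
  exact le_trans (hv _) (foldl_ge_init step h l2 _)

theorem foldl_invariant {α : Type} (P : Int → Prop) (step : Int → α → Int) :
    ∀ (l : List α), (∀ b c, c ∈ l → P b → P (step b c)) → ∀ b, P b → P (l.foldl step b) := by
  intro l
  induction l with
  | nil => intro _ b hb; simpa
  | cons x xs ih =>
    intro h b hb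
    exact ih (fun b c hc => h b c (List.mem_cons_of_mem _ hc)) _ (h b x (List.mem_cons_self) hb)

theorem bColStep_ge (arr : List String) (N i b c : Int) : b ≤ bColStep arr N i b c := by
  unfold bColStep; dsimp only; split_ifs <;> omega

theorem bColStep_ge_odd (arr : List String) (N i b c : Int) :
    (expand arr N i c c N.toNat).2 - (expand arr N i c c N.toNat).1 + 1 ≤ bColStep arr N i b c := by
  unfold bColStep; dsimp only; split_ifs <;> omega

theorem bColStep_ge_even (arr : List String) (N i b c : Int)
    (h : c + 1 < N ∧ charAt arr c i = charAt arr (c + 1) i) :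
    (expand arr N i c (c+1) N.toNat).2 - (expand arr N i c (c+1) N.toNat).1 + 1 ≤ bColStep arr N i b c := by
  unfold bColStep; dsimp only; rw [if_pos h]; split_ifs <;> omega

theorem bCol_ge (arr : List String) (N i b : Int) : b ≤ bCol arr N i b :=
  foldl_ge_init (bColStep arr N i) (fun b c => bColStep_ge arr N i b c) _ b

-- ===== VERDICT (by name: the statement is the Claim_ definition above) =====
theorem col_max_spec : Claim_equal_col_max := by
  intro arr N hDom hPre
  unfold Spec_col_max col_max col_max_alt
  by_cases hN : N ≤ 0
  · rw [if_pos hN, show N.toNat = 0 from by omega, aLoop]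
  · rw [if_neg hN]
    rw [not_le] at hN
    have h1 : aFind arr N 1 = true := by
      simp only [aFind, List.any_eq_true, PySem.List.mem_pyRange_one]
      exact ⟨0, ⟨le_rfl, hN⟩, 0, ⟨le_rfl, by omega⟩,
        by rw [aCheck_eq_PW]; exact PW_small _ _ _ le_rfl⟩
    obtain ⟨g, hg1, hg2, hg3, hg4, hg5⟩ := aLoop_spec arr N h1 N.toNat N (by omega) le_rfl
    rw [hg1]
    -- any palindromic window [lo, hi] of a column has length ≤ g
    have key : ∀ (i lo hi : Int), 0 ≤ i → i < N → 0 ≤ lo → hi < N → lo ≤ hi →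
        PW (fun r => charAt arr r i) lo (hi - lo + 1) = true → hi - lo + 1 ≤ g := by
      intro i lo hi hi0 hi1 hlo hhi hlohi hpw
      by_contra hcon
      rw [not_le] at hcon
      have hfalse : aFind arr N (hi - lo + 1) = false := hg5 _ hcon (by omega)
      have htrue : aFind arr N (hi - lo + 1) = true := by
        simp only [aFind, List.any_eq_true, PySem.List.mem_pyRange_one]
        exact ⟨i, ⟨hi0, hi1⟩, lo, ⟨hlo, by omega⟩, by rw [aCheck_eq_PW]; exact hpw⟩
      rw [hfalse] at htrue
      exact absurd htrue (by simp)
    -- every bColStep on a column keeps the running best in [1, g]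
    have hstep : ∀ (i : Int), 0 ≤ i → i < N → ∀ b c, c ∈ PySem.List.pyRange 0 N 1 →
        (1 ≤ b ∧ b ≤ g) → 1 ≤ bColStep arr N i b c ∧ bColStep arr N i b c ≤ g := by
      intro i hi0 hi1 b c hc hb
      rw [PySem.List.mem_pyRange_one] at hc
      have hodd := expand_sound arr N i N.toNat c c hc.1 hc.2 le_rfl
        (by rw [show c - c + 1 = 1 from by omega]; exact PW_small _ _ _ le_rfl)
      have hoddle := key i _ _ hi0 hi1 hodd.1 hodd.2.1 hodd.2.2.1 hodd.2.2.2
      by_cases hguard : c + 1 < N ∧ charAt arr c i = charAt arr (c + 1) i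
      · have heven := expand_sound arr N i N.toNat c (c+1) hc.1 hguard.1 (by omega)
          (by rw [show c + 1 - c + 1 = 2 from by omega]; exact PW_two _ _ hguard.2)
        have hevenle := key i _ _ hi0 hi1 heven.1 heven.2.1 heven.2.2.1 heven.2.2.2
        unfold bColStep; dsimp only; rw [if_pos hguard]; split_ifs <;> omega
      · unfold bColStep; dsimp only; rw [if_neg hguard]; split_ifs <;> omega
    -- best ≤ g
    have hle : (PySem.List.pyRange 0 N 1).foldl
        (fun best i => if best = N then best else bCol arr N i best) 1 ≤ g := by
      have := foldl_invariant (fun b => 1 ≤ b ∧ b ≤ g)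
        (fun best i => if best = N then best else bCol arr N i best) (PySem.List.pyRange 0 N 1)
        (fun b i hi hb => by
          rw [PySem.List.mem_pyRange_one] at hi
          dsimp only
          split_ifs with hbN
          · exact hb
          · exact foldl_invariant (fun b => 1 ≤ b ∧ b ≤ g) (bColStep arr N i)
              (PySem.List.pyRange 0 N 1) (fun b c hc hb => hstep i hi.1 hi.2 b c hc hb) b hb)
        1 ⟨le_rfl, hg2⟩
      exact this.2
    -- g ≤ best
    have hge : g ≤ (PySem.List.pyRange 0 N 1).foldl
        (fun best i => if best = N then best else bCol arr N i best) 1 := by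
      simp only [aFind, List.any_eq_true, PySem.List.mem_pyRange_one] at hg4
      obtain ⟨i, hi, j, hj, hchk⟩ := hg4
      rw [aCheck_eq_PW] at hchk
      apply foldl_ge_of_mem (fun b i' => if b = N then b else bCol arr N i' b)
        (fun b i' => by dsimp only; split_ifs with h; exacts [le_rfl, bCol_ge arr N i' b]) _ i
        (by rw [PySem.List.mem_pyRange_one]; exact hi) g ?_
      intro b
      dsimp only
      split_ifs with hbN
      · omega
      set c : Int := j + (g - 1) / 2 with hc
      have hcmem : c ∈ PySem.List.pyRange 0 N 1 := by
        rw [PySem.List.mem_pyRange_one]; omega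
      by_cases hpar : g % 2 = 1
      · -- odd length: expand around (c, c)
        have hexp := expand_ge arr N i j g hchk (by omega) (by omega) N.toNat c c
          (by omega) le_rfl (by omega) (by omega)
        exact foldl_ge_of_mem (bColStep arr N i)
          (fun b c => bColStep_ge _ _ _ b c) _ c hcmem g
          (fun b' => le_trans hexp (bColStep_ge_odd _ _ _ b' c)) b
      · -- even length: the center pair is equal, expand around (c, c+1)
        have hcc : charAt arr c i = charAt arr (c + 1) i := by
          have := (PW_iff _ j g).mp hchk ((g - 2) / 2) (by omega) (by rw [fd2]; omega)
          rw [show j + (g - 2) / 2 = c from by omega,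
              show j + (g - 1) - (g - 2) / 2 = c + 1 from by omega] at this
          exact this
        have hguard : c + 1 < N ∧ charAt arr c i = charAt arr (c + 1) i := ⟨by omega, hcc⟩
        have hexp := expand_ge arr N i j g hchk (by omega) (by omega) N.toNat c (c+1)
          (by omega) (by omega) (by omega) (by omega)
        exact foldl_ge_of_mem (bColStep arr N i)
          (fun b c => bColStep_ge _ _ _ b c) _ c hcmem g
          (fun b' => le_trans hexp (bColStep_ge_even _ _ _ b' c hguard)) b
    congr 1
    omega
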